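-- pv_equiv track=rewrite | github.com/GeorgiSamardzhiev/fingerprints | fingerprints.py | postprocessingMinutiaeListDiffType
-- ===== SOURCE A (Python) =====
-- def manhattanDistance(x, y):
--     (x1,x2)=x
--     (y1,y2)=y
--     return abs(x1 - y1) + abs(x2 - y2)
--
-- def postprocessingMinutiaeListDiffType(minutiaeList1, minutiaeList2, tresh = 8, dist = manhattanDistance):
--     res = minutiaeList1.copy()
--     res = res + minutiaeList2
--     for m1 in minutiaeList1:
--         for m2 in minutiaeList2:
--             if dist(m1, m2) < tresh:
--                 if m1 in res:
--                     res.remove(m1)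
--                 if m2 in res:
--                     res.remove(m2)
--     return res
-- ===== SOURCE B (Python) =====
-- def manhattanDistance(x, y):
--     (x1,x2)=x
--     (y1,y2)=y
--     return abs(x1 - y1) + abs(x2 - y2)
--
-- def _bump(d, m):
--     d[m] = d.get(m, 0) + 1
--
-- def postprocessingMinutiaeListDiffType(minutiaeList1, minutiaeList2, tresh = 8, dist = manhattanDistance):
--     # One pass tallies, per point value, how many removal attempts A would make;
--     # a single rebuild pass then skips that many earliest occurrences of each value.
--     attempts = {}
--     for m1 in minutiaeList1:
--         for m2 in minutiaeList2:
--             if dist(m1, m2) < tresh: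
--                 _bump(attempts, m1)
--                 _bump(attempts, m2)
--     out = []
--     for m in minutiaeList1 + minutiaeList2:
--         r = attempts.get(m, 0)
--         if r > 0:
--             attempts[m] = r - 1
--         else:
--             out.append(m)
--     return out
-- ===== Notes on version B (the rewrite author's own statement) =====
-- stated objective: faster
-- what changed: Instead of repeatedly scanning and mutating the result list with 'in'/'remove' for every close pair, B tallies per-value removal-attempt counts in one O(n*m) pass over the pairs and then rebuilds the result in a single pass that skips the earliest occurrences of each value.
import Mathlib
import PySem

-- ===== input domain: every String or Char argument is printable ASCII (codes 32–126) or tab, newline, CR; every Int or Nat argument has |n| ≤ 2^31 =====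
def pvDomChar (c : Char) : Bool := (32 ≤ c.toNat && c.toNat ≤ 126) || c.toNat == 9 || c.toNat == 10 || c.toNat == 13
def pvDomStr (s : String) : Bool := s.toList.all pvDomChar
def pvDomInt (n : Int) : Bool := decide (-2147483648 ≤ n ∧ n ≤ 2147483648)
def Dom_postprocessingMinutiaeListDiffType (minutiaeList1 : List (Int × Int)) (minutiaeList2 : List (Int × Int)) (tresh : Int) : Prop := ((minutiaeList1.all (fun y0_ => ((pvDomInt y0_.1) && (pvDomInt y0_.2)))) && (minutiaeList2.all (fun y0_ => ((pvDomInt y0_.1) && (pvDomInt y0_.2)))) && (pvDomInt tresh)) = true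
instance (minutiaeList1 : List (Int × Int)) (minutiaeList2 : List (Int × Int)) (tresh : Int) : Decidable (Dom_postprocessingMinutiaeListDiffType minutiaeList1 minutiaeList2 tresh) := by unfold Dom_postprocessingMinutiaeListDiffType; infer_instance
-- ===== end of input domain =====

-- B replaces A's repeated in/remove scans over the result list by one pass that tallies
-- per-value removal-attempt counts and a single rebuild pass (objective: faster).

-- ===== PORT A =====
def manhattanDistance (x : Int × Int) (y : Int × Int) : Int :=
  |x.1 - y.1| + |x.2 - y.2|

-- 'if m in res: res.remove(m)' — remove first occurrence when present
def pyErase (res : List (Int × Int)) (m : Int × Int) : List (Int × Int) :=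
  if m ∈ res then res.erase m else res

def postprocessingMinutiaeListDiffType (minutiaeList1 : List (Int × Int)) (minutiaeList2 : List (Int × Int)) (tresh : Int) : List (Int × Int) :=
  minutiaeList1.foldl (fun res m1 =>
    minutiaeList2.foldl (fun res m2 =>
      if manhattanDistance m1 m2 < tresh then pyErase (pyErase res m1) m2 else res) res)
    (minutiaeList1 ++ minutiaeList2)

-- ===== PORT B =====
-- _bump(d, m): d[m] = d.get(m, 0) + 1
def pvBump (d : PySem.Dict (Int × Int) Int) (m : Int × Int) : PySem.Dict (Int × Int) Int :=
  d.insert m (d.getD m 0 + 1)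

-- one step of B's rebuild loop over (attempts, out)
def pvStep (st : PySem.Dict (Int × Int) Int × List (Int × Int)) (m : Int × Int) :
    PySem.Dict (Int × Int) Int × List (Int × Int) :=
  let r := st.1.getD m 0
  if r > 0 then (st.1.insert m (r - 1), st.2) else (st.1, st.2 ++ [m])

def postprocessingMinutiaeListDiffType_alt (minutiaeList1 : List (Int × Int)) (minutiaeList2 : List (Int × Int)) (tresh : Int) : List (Int × Int) :=
  let attempts := minutiaeList1.foldl (fun d m1 =>
    minutiaeList2.foldl (fun d m2 =>
      if manhattanDistance m1 m2 < tresh then pvBump (pvBump d m1) m2 else d) d)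
    PySem.Dict.empty
  (((minutiaeList1 ++ minutiaeList2).foldl pvStep (attempts, [])).2)

-- ===== PRECONDITION & SPEC =====
def Spec_postprocessingMinutiaeListDiffType (minutiaeList1 : List (Int × Int)) (minutiaeList2 : List (Int × Int)) (tresh : Int) (out : List (Int × Int)) : Prop := out = postprocessingMinutiaeListDiffType_alt minutiaeList1 minutiaeList2 tresh
instance (minutiaeList1 : List (Int × Int)) (minutiaeList2 : List (Int × Int)) (tresh : Int) (out : List (Int × Int)) : Decidable (Spec_postprocessingMinutiaeListDiffType minutiaeList1 minutiaeList2 tresh out) := by unfold Spec_postprocessingMinutiaeListDiffType; infer_instance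

-- ===== CLAIM (what is proved, stated in full; the proofs are below) =====
def Claim_equal_postprocessingMinutiaeListDiffType : Prop := ∀ (minutiaeList1 : List (Int × Int)) (minutiaeList2 : List (Int × Int)) (tresh : Int), Dom_postprocessingMinutiaeListDiffType minutiaeList1 minutiaeList2 tresh → Spec_postprocessingMinutiaeListDiffType minutiaeList1 minutiaeList2 tresh (postprocessingMinutiaeListDiffType minutiaeList1 minutiaeList2 tresh)

-- ===== LEMMAS AND PROOFS =====

-- the flat sequence of removal-attempt values generated by the pair loop
def pvSeq (l1 l2 : List (Int × Int)) (t : Int) : List (Int × Int) :=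
  l1.flatMap (fun m1 => l2.flatMap (fun m2 =>
    if manhattanDistance m1 m2 < t then [m1, m2] else []))

-- 'survive a L': drop the first (a v) occurrences of each value v from L
def pvSurvive (a : (Int × Int) → Nat) : List (Int × Int) → List (Int × Int)
  | [] => []
  | x :: xs =>
    if a x = 0 then x :: pvSurvive a xs
    else pvSurvive (Function.update a x (a x - 1)) xs

-- both nested pair loops are the flat fold over pvSeq
theorem pv_inner_eq_flat {σ : Type} (g : σ → (Int × Int) → σ) (m1 : Int × Int) (l2 : List (Int × Int)) (t : Int) (s : σ) :
    l2.foldl (fun s m2 => if manhattanDistance m1 m2 < t then g (g s m1) m2 else s) s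
    = (l2.flatMap (fun m2 => if manhattanDistance m1 m2 < t then [m1, m2] else [])).foldl g s := by
  induction l2 generalizing s with
  | nil => rfl
  | cons m2 l2 ih =>
    simp only [List.foldl_cons, List.flatMap_cons, List.foldl_append]
    by_cases h : manhattanDistance m1 m2 < t <;> simp [h, ih]

theorem pv_nested_eq_flat {σ : Type} (g : σ → (Int × Int) → σ) (l1 l2 : List (Int × Int)) (t : Int) (s : σ) :
    l1.foldl (fun s m1 => l2.foldl (fun s m2 =>
      if manhattanDistance m1 m2 < t then g (g s m1) m2 else s) s) s
    = (pvSeq l1 l2 t).foldl g s := by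
  induction l1 generalizing s with
  | nil => simp [pvSeq]
  | cons m1 l1 ih =>
    simp only [List.foldl_cons, pvSeq, List.flatMap_cons, List.foldl_append]
    rw [pv_inner_eq_flat, ih]
    rfl

theorem pvSurvive_congr (a b : (Int × Int) → Nat) (L : List (Int × Int))
    (h : ∀ x ∈ L, a x = b x) : pvSurvive a L = pvSurvive b L := by
  induction L generalizing a b with
  | nil => rfl
  | cons x xs ih =>
    have hx := h x (by simp)
    simp only [pvSurvive, hx]
    split
    · rw [ih _ _ (fun y hy => h y (by simp [hy]))]
    · refine ih _ _ (fun y hy => ?_)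
      by_cases hyx : y = x <;> simp [Function.update, hyx, h y (by simp [hy])]

theorem pvSurvive_zero (L : List (Int × Int)) : pvSurvive (fun _ => 0) L = L := by
  induction L with
  | nil => rfl
  | cons x xs ih => simp [pvSurvive, ih]

theorem pyErase_eq_erase (L : List (Int × Int)) (m : Int × Int) : pyErase L m = L.erase m := by
  unfold pyErase
  split
  · rfl
  · exact (List.erase_of_not_mem (by assumption)).symm

theorem pvSurvive_erase (a : (Int × Int) → Nat) (m : Int × Int) (L : List (Int × Int)) :
    pvSurvive a (L.erase m) = pvSurvive (Function.update a m (a m + 1)) L := by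
  induction L generalizing a with
  | nil => rfl
  | cons x xs ih =>
    by_cases hx : x = m
    · subst hx
      rw [List.erase_cons_head]
      have h1 : (Function.update a x (a x + 1)) x = a x + 1 := by simp
      simp only [pvSurvive, h1]
      rw [if_neg (by omega)]
      have h2 : Function.update (Function.update a x (a x + 1)) x (a x + 1 - 1)
          = a := by
        funext y; by_cases hy : y = x <;> simp [Function.update, hy]
      rw [h2]
    · rw [List.erase_cons_tail (by simp [hx])]
      have hxm : (Function.update a m (a m + 1)) x = a x := by
        simp [Function.update, hx]
      simp only [pvSurvive, hxm]
      split
      · rw [ih]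
      · rw [ih]
        congr 1
        funext y
        by_cases hy1 : y = x <;> by_cases hy2 : y = m <;>
          simp_all [Function.update]

theorem pv_eraseFold_eq_survive (s : List (Int × Int)) (L : List (Int × Int)) :
    s.foldl pyErase L = pvSurvive (fun v => s.count v) L := by
  induction s generalizing L with
  | nil => simp [List.foldl_nil, pvSurvive_zero]
  | cons m s ih =>
    rw [List.foldl_cons, ih, pyErase_eq_erase, pvSurvive_erase]
    refine pvSurvive_congr _ _ _ (fun x _ => ?_)
    by_cases hx : x = m
    · subst hx; simp [Function.update]
    · simp [Function.update, hx, Ne.symm hx]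

theorem pv_bumpFold_getD (s : List (Int × Int)) (v : Int × Int) :
    (s.foldl pvBump PySem.Dict.empty).getD v 0 = (s.count v : Int) := by
  have := PySem.Dict.getD_foldl_insert_add_one (l := s) (d := (PySem.Dict.empty : PySem.Dict (Int × Int) Int)) (v := v)
  simpa [pvBump, PySem.Dict.getD_empty] using this

theorem pv_stepFold (L : List (Int × Int)) (d : PySem.Dict (Int × Int) Int)
    (cnt : (Int × Int) → Nat) (out : List (Int × Int))
    (h : ∀ v, d.getD v 0 = (cnt v : Int)) :
    (L.foldl pvStep (d, out)).2 = out ++ pvSurvive cnt L := by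
  induction L generalizing d cnt out with
  | nil => simp [pvSurvive]
  | cons m L ih =>
    rw [List.foldl_cons]
    by_cases hm : cnt m = 0
    · have hr : ¬ (d.getD m 0 > 0) := by rw [h m, hm]; simp
      simp only [pvStep, if_neg hr]
      rw [ih d cnt (out ++ [m]) h]
      simp [pvSurvive, hm]
    · have hr : d.getD m 0 > 0 := by rw [h m]; exact_mod_cast Nat.pos_of_ne_zero hm
      simp only [pvStep, if_pos hr]
      rw [ih (d.insert m (d.getD m 0 - 1)) (Function.update cnt m (cnt m - 1)) out
        (fun v => by
          rw [PySem.Dict.getD_insert]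
          by_cases hv : v = m
          · subst hv
            rw [if_pos rfl, Function.update_self, h v]
            omega
          · simp [Function.update, hv, h v])]
      simp only [pvSurvive, if_neg hm]

-- ===== VERDICT (by name: the statement is the Claim_ definition above) =====
theorem postprocessingMinutiaeListDiffType_spec : Claim_equal_postprocessingMinutiaeListDiffType := by
  intro l1 l2 t _
  unfold Spec_postprocessingMinutiaeListDiffType
  unfold postprocessingMinutiaeListDiffType postprocessingMinutiaeListDiffType_alt
  rw [pv_nested_eq_flat pyErase, pv_nested_eq_flat pvBump]
  rw [pv_eraseFold_eq_survive]
  rw [pv_stepFold _ _ (fun v => (pvSeq l1 l2 t).count v) [] (fun v => pv_bumpFold_getD _ v)]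
  simp
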